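-- pv_equiv track=rewrite | github.com/hehepig4/saturn | source/evaluation/runners/structural_retrieval.py | find_best_rank_multi_gt
-- ===== SOURCE A (Python) =====
-- from typing import Dict, Any, List, Optional, Set, Tuple
--
-- def find_best_rank_multi_gt(result_ids: List[str], gt_tables: List[str]) -> Optional[int]:
--     """Find the best (minimum) rank among all ground truth tables.
--
--     Args:
--         result_ids: List of table IDs in retrieval order
--         gt_tables: List of ground truth table IDs (may be single or multiple)
--
--     Returns:
--         Best rank (1-indexed) if any GT found, None if none found
--     """
--     best_rank = None
--     for gt in gt_tables:
--         try:
--             rank = result_ids.index(gt) + 1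
--             if best_rank is None or rank < best_rank:
--                 best_rank = rank
--         except ValueError:
--             continue
--     return best_rank
-- ===== SOURCE B (Python) =====
-- def find_best_rank_multi_gt(result_ids, gt_tables):
--     """Find the best (minimum) rank among all ground truth tables.
--
--     Scans result_ids once in retrieval order and returns the rank of the
--     first result that is a ground-truth table; the earliest such position
--     is exactly the minimum first-occurrence rank over all GT tables.
--     """
--     gt_set = set(gt_tables)
--     for rank, tid in enumerate(result_ids, 1):
--         if tid in gt_set:
--             return rank
--     return None
-- ===== Notes on version B (the rewrite author's own statement) =====
-- stated objective: faster
-- what changed: B inverts the traversal: instead of looping over gt_tables and scanning result_ids with .index for each, it scans result_ids once with early return, stopping at the first id contained in the ground-truth set (that position is the minimum rank).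
import Mathlib
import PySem

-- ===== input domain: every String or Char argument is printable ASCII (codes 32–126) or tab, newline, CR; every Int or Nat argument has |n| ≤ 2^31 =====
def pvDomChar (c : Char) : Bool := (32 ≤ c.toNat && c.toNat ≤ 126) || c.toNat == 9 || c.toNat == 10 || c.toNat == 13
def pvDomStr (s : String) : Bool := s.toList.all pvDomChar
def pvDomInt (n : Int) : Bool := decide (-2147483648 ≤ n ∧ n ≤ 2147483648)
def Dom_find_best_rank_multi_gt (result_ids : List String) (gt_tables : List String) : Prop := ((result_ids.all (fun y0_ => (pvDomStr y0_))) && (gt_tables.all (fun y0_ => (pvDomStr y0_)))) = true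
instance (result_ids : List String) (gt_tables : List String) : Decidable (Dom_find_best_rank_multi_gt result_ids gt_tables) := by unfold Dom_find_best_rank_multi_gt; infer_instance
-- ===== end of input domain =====

-- B inverts the traversal for speed: one early-exit scan of result_ids against the ground-truth set
-- instead of A's per-gt .index scans; the first hit's position is the minimum rank.

-- ===== PORT A =====
-- A: for each gt, rank = result_ids.index(gt)+1 (continue on ValueError), keep the strictly smaller rank.
def find_best_rank_multi_gt (result_ids : List String) (gt_tables : List String) : Option Int :=
  gt_tables.foldl (fun best gt =>
    match PySem.List.index? result_ids gt with
    | none => best          -- ValueError: continue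
    | some i =>
      let rank : Int := (i : Int) + 1
      match best with
      | none => some rank
      | some b => if rank < b then some rank else best) none

-- ===== PORT B =====
-- B's loop: 'for rank, tid in enumerate(result_ids, 1): if tid in gt_set: return rank' — early return as recursion.
def fbrScan (gt_set : PySem.Set String) : List String → Int → Option Int
  | [], _ => none
  | tid :: rest, rank => if PySem.Set.contains gt_set tid then some rank else fbrScan gt_set rest (rank + 1)

def find_best_rank_multi_gt_alt (result_ids : List String) (gt_tables : List String) : Option Int :=
  let gt_set : PySem.Set String := PySem.Set.ofList gt_tables
  fbrScan gt_set result_ids 1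

-- ===== PRECONDITION & SPEC =====
def Spec_find_best_rank_multi_gt (result_ids : List String) (gt_tables : List String) (out : Option Int) : Prop := out = find_best_rank_multi_gt_alt result_ids gt_tables
instance (result_ids : List String) (gt_tables : List String) (out : Option Int) : Decidable (Spec_find_best_rank_multi_gt result_ids gt_tables out) := by unfold Spec_find_best_rank_multi_gt; infer_instance

-- ===== CLAIM (what is proved, stated in full; the proofs are below) =====
def Claim_equal_find_best_rank_multi_gt : Prop := ∀ (result_ids : List String) (gt_tables : List String), Dom_find_best_rank_multi_gt result_ids gt_tables → Spec_find_best_rank_multi_gt result_ids gt_tables (find_best_rank_multi_gt result_ids gt_tables)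

-- ===== LEMMAS AND PROOFS =====

-- A's loop over gt_tables is the 'keep strictly smaller' fold over the list of found ranks.
theorem foldA_filterMap (rids : List String) (gts : List String) (best : Option Int) :
    gts.foldl (fun best gt =>
      match PySem.List.index? rids gt with
      | none => best
      | some i =>
        let rank : Int := (i : Int) + 1
        match best with
        | none => some rank
        | some b => if rank < b then some rank else best) best =
    (gts.filterMap (fun gt => (PySem.List.index? rids gt).map (fun i => ((i : Int) + 1)))).foldl
      (fun best r => match best with | none => some r | some b => if r < b then some r else best)
      best := by
  induction gts generalizing best with
  | nil => rfl
  | cons g gts ih =>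
    rw [List.foldl_cons, List.filterMap_cons]
    cases h : PySem.List.index? rids g with
    | none => exact ih _
    | some i => exact ih _

-- The 'keep strictly smaller' fold is Python's min over the nonempty rank list.
theorem foldA_min? (t : List Int) :
    t.foldl (fun best r =>
      match best with
      | none => some r
      | some b => if r < b then some r else best) none = PySem.List.min? t (fun x => x) := by
  cases t with
  | nil => rfl
  | cons x t =>
    rw [List.foldl_cons, PySem.List.min?_id_cons]
    show t.foldl _ (some x) = _
    induction t generalizing x with
    | nil => rfl
    | cons r t ih =>
      rw [List.foldl_cons, List.foldl_cons]
      have hred : (if r < x then some r else some x) = some (min x r) := by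
        split <;> (congr 1; omega)
      show t.foldl _ (if r < x then some r else some x) = _
      rw [hred, ih]

-- min of a list that contains m and whose elements are all ≥ m.
theorem min?_id_eq_some {L : List Int} {m : Int} (hm : m ∈ L) (hle : ∀ y ∈ L, m ≤ y) :
    PySem.List.min? L (fun x => x) = some m := by
  cases h : PySem.List.min? L (fun x => x) with
  | none =>
    rw [PySem.List.min?_eq_none_iff] at h
    subst h; cases hm
  | some m' =>
    have h1 : m' ∈ L := PySem.List.min?_mem h
    have h2 : m' ≤ m := PySem.List.min?_isMin h m hm
    have h3 : m ≤ m' := hle m' h1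
    congr 1; omega

-- Main invariant: the minimum (offset by the start rank s) over A's found ranks
-- equals B's early-exit scan of result_ids starting at rank s.
theorem min_ranks_eq_scan (rids : List String) (gts : List String) (s : Int) :
    PySem.List.min? (gts.filterMap (fun gt => (PySem.List.index? rids gt).map (fun i => s + (i : Int))))
      (fun x => x) = fbrScan (PySem.Set.ofList gts) rids s := by
  induction rids generalizing s with
  | nil =>
    have : gts.filterMap (fun gt => (PySem.List.index? ([] : List String) gt).map (fun i => s + (i : Int))) = [] := by
      simp [PySem.List.index?_eq_idxOf?, List.idxOf?]
    rw [this]; rfl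
  | cons x xs ih =>
    by_cases hx : x ∈ gts
    · rw [show fbrScan (PySem.Set.ofList gts) (x :: xs) s = some s by simp [fbrScan, hx]]
      apply min?_id_eq_some
      · rw [List.mem_filterMap]
        exact ⟨x, hx, by rw [PySem.List.index?_cons_self]; simp⟩
      · intro y hy
        rw [List.mem_filterMap] at hy
        obtain ⟨gt, _, hgt⟩ := hy
        cases h : PySem.List.index? (x :: xs) gt with
        | none => rw [h] at hgt; cases hgt
        | some i => rw [h] at hgt; simp at hgt; omega
    · rw [show fbrScan (PySem.Set.ofList gts) (x :: xs) s = fbrScan (PySem.Set.ofList gts) xs (s + 1) by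
        simp [fbrScan, hx]]
      rw [← ih (s + 1)]
      congr 1
      apply List.filterMap_congr
      intro gt hgt
      have hne : x ≠ gt := by rintro rfl; exact hx hgt
      rw [PySem.List.index?_cons_of_ne _ hne]
      cases PySem.List.index? xs gt <;> simp; omega

-- ===== VERDICT (by name: the statement is the Claim_ definition above) =====
theorem find_best_rank_multi_gt_spec : Claim_equal_find_best_rank_multi_gt := by
  intro result_ids gt_tables _
  unfold Spec_find_best_rank_multi_gt find_best_rank_multi_gt find_best_rank_multi_gt_alt
  rw [foldA_filterMap, foldA_min?, ← min_ranks_eq_scan]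
  congr 1
  apply List.filterMap_congr
  intro gt _
  cases PySem.List.index? result_ids gt <;> simp; omega
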